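-- pv_equiv track=rewrite | github.com/wj0575/huohuabei25 | operate.py | find_nearest_path
-- ===== SOURCE A (Python) =====
-- def find_nearest_path(start_i, start_j, target):
--     # 简单直线路径生成（实际可替换为BFS）
--     path = [[start_i, start_j]]
--     i, j = start_i, start_j
--     while (i != target[0]) or (j != target[1]):
--         if i < target[0]:
--             i += 1
--         elif i > target[0]:
--             i -= 1
--         if j < target[1]:
--             j += 1
--         elif j > target[1]:
--             j -= 1
--         path.append([i, j])
--     return path
-- ===== SOURCE B (Python) =====
-- def find_nearest_path(start_i, start_j, target):
--     di = target[0] - start_i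
--     dj = target[1] - start_j
--     si = (di > 0) - (di < 0)
--     sj = (dj > 0) - (dj < 0)
--     L = max(abs(di), abs(dj))
--     return [[start_i + si * min(k, abs(di)),
--              start_j + sj * min(k, abs(dj))] for k in range(L + 1)]
-- ===== Notes on version B (the rewrite author's own statement) =====
-- stated objective: alternative
-- what changed: Replaces the incremental state-updating while loop (step one cell per iteration, appending to a growing list) with a closed-form index-to-coordinate comprehension over range(max(|di|,|dj|)+1) using signs and min.
import Mathlib
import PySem

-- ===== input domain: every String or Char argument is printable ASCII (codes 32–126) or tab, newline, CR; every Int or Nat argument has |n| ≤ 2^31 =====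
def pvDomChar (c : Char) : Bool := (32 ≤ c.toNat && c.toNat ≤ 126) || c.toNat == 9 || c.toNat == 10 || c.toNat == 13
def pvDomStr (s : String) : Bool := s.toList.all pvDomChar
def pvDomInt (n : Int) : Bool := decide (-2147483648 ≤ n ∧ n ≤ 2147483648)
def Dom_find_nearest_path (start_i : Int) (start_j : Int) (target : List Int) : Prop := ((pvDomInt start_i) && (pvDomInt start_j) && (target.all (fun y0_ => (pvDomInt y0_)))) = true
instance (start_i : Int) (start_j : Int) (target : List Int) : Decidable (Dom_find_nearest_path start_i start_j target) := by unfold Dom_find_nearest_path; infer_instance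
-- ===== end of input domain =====

-- B replaces A's incremental while loop by a closed-form index→coordinate comprehension (objective: alternative decomposition, same cost).

-- ===== PORT A =====
-- A's while loop: step i and j one unit towards target, appending [i, j] each iteration.
-- Totalised with a fuel counter; the Manhattan distance bounds the number of iterations.
def pvGoA (fuel : Nat) (t0 t1 i j : Int) (acc : List (List Int)) : List (List Int) :=
  match fuel with
  | 0 => acc
  | fuel + 1 =>
    if i = t0 ∧ j = t1 then acc
    else
      pvGoA fuel t0 t1
        (if i < t0 then i + 1 else if t0 < i then i - 1 else i)
        (if j < t1 then j + 1 else if t1 < j then j - 1 else j)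
        (acc ++ [[(if i < t0 then i + 1 else if t0 < i then i - 1 else i),
                  (if j < t1 then j + 1 else if t1 < j then j - 1 else j)]])

def find_nearest_path (start_i : Int) (start_j : Int) (target : List Int) : List (List Int) :=
  pvGoA ((target.getD 0 0 - start_i).natAbs + (target.getD 1 0 - start_j).natAbs)
    (target.getD 0 0) (target.getD 1 0) start_i start_j [[start_i, start_j]]

-- ===== PORT B =====
-- sign = (x > 0) - (x < 0)
def pvSgn (x : Int) : Int := (if 0 < x then 1 else 0) - (if x < 0 then 1 else 0)

def find_nearest_path_alt (start_i : Int) (start_j : Int) (target : List Int) : List (List Int) :=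
  let di := target.getD 0 0 - start_i
  let dj := target.getD 1 0 - start_j
  let si := pvSgn di
  let sj := pvSgn dj
  let L := max |di| |dj|
  (List.range (L.toNat + 1)).map
    (fun (k : Nat) => [start_i + si * min (k : Int) |di|, start_j + sj * min (k : Int) |dj|])

-- ===== PRECONDITION & SPEC =====
-- Pre_ excludes exactly the inputs where Python A raises IndexError: target must have at least two elements.
def Pre_find_nearest_path (start_i : Int) (start_j : Int) (target : List Int) : Prop := 2 ≤ target.length
instance (start_i : Int) (start_j : Int) (target : List Int) : Decidable (Pre_find_nearest_path start_i start_j target) := by unfold Pre_find_nearest_path; infer_instance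
def pvWitness_find_nearest_path : Int × Int × List Int := (0, 0, [2, 3])

def Spec_find_nearest_path (start_i : Int) (start_j : Int) (target : List Int) (out : List (List Int)) : Prop := out = find_nearest_path_alt start_i start_j target
instance (start_i : Int) (start_j : Int) (target : List Int) (out : List (List Int)) : Decidable (Spec_find_nearest_path start_i start_j target out) := by unfold Spec_find_nearest_path; infer_instance

-- ===== CLAIM (what is proved, stated in full; the proofs are below) =====
def Claim_equal_find_nearest_path : Prop := ∀ (start_i : Int) (start_j : Int) (target : List Int), Dom_find_nearest_path start_i start_j target → Pre_find_nearest_path start_i start_j target → Spec_find_nearest_path start_i start_j target (find_nearest_path start_i start_j target)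

-- ===== LEMMAS AND PROOFS =====

-- the point B emits at index k, measured from a (possibly advanced) start (i, j)
def pvPt (t0 t1 i j k : Int) : List Int :=
  [i + pvSgn (t0 - i) * min k |t0 - i|, j + pvSgn (t1 - j) * min k |t1 - j|]

set_option maxHeartbeats 1000000 in
theorem pvStep_coord (t i k : Int) (hk : 0 ≤ k) :
    (if i < t then i + 1 else if t < i then i - 1 else i)
      + pvSgn (t - (if i < t then i + 1 else if t < i then i - 1 else i))
        * min k |t - (if i < t then i + 1 else if t < i then i - 1 else i)|
      = i + pvSgn (t - i) * min (k + 1) |t - i| := by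
  unfold pvSgn
  split_ifs <;> simp only [Int.abs_eq_natAbs] <;> omega

-- one loop step of A shifts B's index by one
theorem pvStep_pt (t0 t1 i j k : Int) (hk : 0 ≤ k) :
    pvPt t0 t1
      (if i < t0 then i + 1 else if t0 < i then i - 1 else i)
      (if j < t1 then j + 1 else if t1 < j then j - 1 else j) k
      = pvPt t0 t1 i j (k + 1) := by
  unfold pvPt
  rw [pvStep_coord t0 i k hk, pvStep_coord t1 j k hk]

set_option maxHeartbeats 1000000 in
theorem pvStep_measure (t0 t1 i j : Int) (h : ¬ (i = t0 ∧ j = t1)) :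
    (max |t0 - (if i < t0 then i + 1 else if t0 < i then i - 1 else i)|
         |t1 - (if j < t1 then j + 1 else if t1 < j then j - 1 else j)|)
      = max |t0 - i| |t1 - j| - 1 := by
  rcases not_and_or.mp h with h' | h' <;>
    split_ifs <;> simp only [Int.abs_eq_natAbs] <;> omega

theorem pvPt_zero (t0 t1 i j : Int) : pvPt t0 t1 i j 0 = [i, j] := by
  unfold pvPt
  have h1 : min (0:Int) |t0 - i| = 0 := min_eq_left (abs_nonneg _)
  have h2 : min (0:Int) |t1 - j| = 0 := min_eq_left (abs_nonneg _)
  rw [h1, h2, mul_zero, mul_zero, add_zero, add_zero]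

theorem pvGoA_closed (t0 t1 : Int) : ∀ (fuel : Nat) (n : Nat) (i j : Int) (acc : List (List Int)),
    (max |t0 - i| |t1 - j|).toNat = n → n ≤ fuel →
    pvGoA fuel t0 t1 i j acc
      = acc ++ (List.range n).map (fun (k : Nat) => pvPt t0 t1 i j ((k : Int) + 1)) := by
  intro fuel
  induction fuel with
  | zero =>
    intro n i j acc h hle
    have hn : n = 0 := Nat.le_zero.mp hle
    subst hn
    rw [pvGoA]; simp
  | succ fuel ih =>
    intro n i j acc h hle
    by_cases h0 : i = t0 ∧ j = t1
    · have hn : n = 0 := by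
        simp only [Int.abs_eq_natAbs] at h; omega
      subst hn
      rw [pvGoA, if_pos h0]; simp
    · match n, h with
      | 0, h => exact absurd (by simp only [Int.abs_eq_natAbs] at h; omega) h0
      | n + 1, h => ?_
      rw [pvGoA, if_neg h0]
      have hmn : (max |t0 - (if i < t0 then i + 1 else if t0 < i then i - 1 else i)|
           |t1 - (if j < t1 then j + 1 else if t1 < j then j - 1 else j)|).toNat = n := by
        rw [pvStep_measure t0 t1 i j h0]
        simp only [Int.abs_eq_natAbs] at h ⊢; omega
      rw [ih n _ _ _ hmn (by omega)]
      have hpt0 : [(if i < t0 then i + 1 else if t0 < i then i - 1 else i),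
                   (if j < t1 then j + 1 else if t1 < j then j - 1 else j)]
          = pvPt t0 t1 i j 1 := by
        have h01 := pvStep_pt t0 t1 i j 0 le_rfl
        rw [zero_add] at h01
        rw [← h01, pvPt_zero]
      rw [List.range_succ_eq_map, List.map_cons, List.map_map, List.append_assoc,
        List.singleton_append, hpt0]
      refine congrArg (fun l => acc ++ l) ?_
      have hhead : pvPt t0 t1 i j (((0:Nat) : Int) + 1) = pvPt t0 t1 i j 1 := by
        rw [Nat.cast_zero, zero_add]
      rw [hhead]
      refine congrArg (fun l => pvPt t0 t1 i j 1 :: l) ?_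
      apply List.map_congr_left
      intro a _
      simp only [Function.comp]
      rw [pvStep_pt t0 t1 i j ((a : Int) + 1) (by positivity)]
      congr 1

-- ===== VERDICT (by name: the statement is the Claim_ definition above) =====
theorem find_nearest_path_spec : Claim_equal_find_nearest_path := by
  intro start_i start_j target _ _
  unfold Spec_find_nearest_path
  simp only [find_nearest_path, find_nearest_path_alt]
  have hfun : (fun (k : Nat) =>
      [start_i + pvSgn (target.getD 0 0 - start_i) * min (k : Int) |target.getD 0 0 - start_i|,
       start_j + pvSgn (target.getD 1 0 - start_j) * min (k : Int) |target.getD 1 0 - start_j|])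
      = fun (k : Nat) => pvPt (target.getD 0 0) (target.getD 1 0) start_i start_j (k : Int) := rfl
  rw [hfun]
  rw [pvGoA_closed (target.getD 0 0) (target.getD 1 0)
      ((target.getD 0 0 - start_i).natAbs + (target.getD 1 0 - start_j).natAbs)
      ((max |target.getD 0 0 - start_i| |target.getD 1 0 - start_j|).toNat) start_i start_j _ rfl
      (by simp only [Int.abs_eq_natAbs]; omega)]
  rw [List.range_succ_eq_map, List.map_cons, List.map_map, List.singleton_append]
  have hhead : pvPt (target.getD 0 0) (target.getD 1 0) start_i start_j (((0:Nat)) : Int)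
      = [start_i, start_j] := by
    rw [Nat.cast_zero, pvPt_zero]
  rw [hhead]
  refine congrArg (fun l => [start_i, start_j] :: l) ?_
  apply List.map_congr_left
  intro a _
  simp only [Function.comp]
  congr 1
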